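-- pv_equiv track=rewrite | github.com/tyler1zhang/Advanture_of_Code | GRL/.ipynb_checkpoints/solution_for_all-checkpoint.py | password_increment
-- ===== SOURCE A (Python) =====
-- def password_increment(pw): #create new pw by increment 1
--     pw+='a'   # append 'a' to end
--     for i in range(1, len(pw)): #check if ending with i 'a'
--         if pw[-i:].count('a')==i:
--             increment=2 if pw[-i-1] in {'h','n','k'} else 1 # char before i, o, l
--             new_letter=chr(ord(pw[-i-1]) + increment) if pw[-1-i]!='z' else 'a'
--             pw=pw[:len(pw)-i-1] + new_letter+pw[len(pw)-i:]
--     return pw[:len(pw)-1] # remove appended 'a'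
-- ===== SOURCE B (Python) =====
-- def password_increment(pw):
--     head = pw.rstrip('z')                    # everything before the trailing run of 'z'
--     wrapped = 'a' * (len(pw) - len(head))    # each trailing 'z' wraps to 'a'
--     if not head:
--         return wrapped                       # carry out of the top is dropped, as in A
--     c = head[-1]
--     bump = 2 if c in ('h', 'n', 'k') else 1  # skip i, o, l
--     return head[:-1] + chr(ord(c) + bump) + wrapped
-- ===== Notes on version B (the rewrite author's own statement) =====
-- stated objective: faster
-- what changed: Replaced A's quadratic loop (n iterations, each re-slicing and re-counting a growing suffix and re-concatenating the whole string) by a single split at the trailing 'z'-run: strip the trailing 'z's, bump the last remaining character once, append the wrapped 'a's.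
-- intended difference: On passwords whose last non-'z' character is a backquote (the character below 'a', outside the password alphabet) and is not the first character, A's suffix recount accidentally treats backquote+1 as a z-style wrap and keeps carrying leftwards, while B stops the carry after bumping the backquote; stopping at a non-'z' character is the intended rule. — e.g. on password_increment("b`"): A returns "ca", B returns "ba"
import Mathlib
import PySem

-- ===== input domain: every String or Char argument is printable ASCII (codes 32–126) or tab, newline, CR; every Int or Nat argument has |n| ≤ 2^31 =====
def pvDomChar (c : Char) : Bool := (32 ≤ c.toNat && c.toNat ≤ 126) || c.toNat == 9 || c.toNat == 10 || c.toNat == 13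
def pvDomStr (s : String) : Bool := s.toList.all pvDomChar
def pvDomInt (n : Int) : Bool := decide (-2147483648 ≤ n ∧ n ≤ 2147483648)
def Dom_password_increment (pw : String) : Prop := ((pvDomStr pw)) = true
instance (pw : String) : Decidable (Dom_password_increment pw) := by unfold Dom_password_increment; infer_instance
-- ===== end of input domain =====

-- B replaces A's quadratic suffix-recounting loop by one split at the trailing 'z'-run (strip,
-- bump once, append wrapped 'a's): asymptotically faster (O(n) vs O(n^2)); on the out-of-alphabet
-- corner described at D_ below, B intentionally stops the carry where A accidentally continues it.

-- ===== PORT A =====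
-- the body of A's for-loop for a given i, acting on the current password as a char list
def pwStepA (s : List Char) (i : Int) : List Char :=
  if (PySem.List.count (PySem.List.slice s (some (-i)) none) 'a' : Int) = i then   -- if pw[-i:].count('a')==i
    -- pw[-i-1] is always in range during the loop (1 ≤ i ≤ len(pw)-1), so the default is never used
    let c : Char := PySem.List.pyGetD s (-i - 1) 'a'
    let increment : Int := if PySem.Set.contains (PySem.Set.ofList ['h', 'n', 'k']) c then 2 else 1
    let new_letter : Char :=
      if PySem.List.pyGetD s (-1 - i) 'a' ≠ 'z' then Char.ofNat (c.toNat + increment.toNat) else 'a'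
    -- pw = pw[:len(pw)-i-1] + new_letter + pw[len(pw)-i:]
    PySem.List.slice s none (some (PySem.List.len s - i - 1)) ++ [new_letter] ++
      PySem.List.slice s (some (PySem.List.len s - i)) none
  else s

def password_increment (pw : String) : String :=
  let s := pw.toList ++ ['a']                                           -- pw += 'a'
  let s := (PySem.List.pyRange 1 (PySem.List.len s)).foldl pwStepA s    -- for i in range(1, len(pw)): ...
  String.ofList (PySem.List.slice s none (some (PySem.List.len s - 1))) -- return pw[:len(pw)-1]

-- ===== PORT B =====
def password_increment_alt (pw : String) : String :=
  -- head = pw.rstrip('z'); ported by hand (PySem has no rstrip-with-argument): exact for one strip char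
  let head : List Char := (pw.toList.reverse.dropWhile (· == 'z')).reverse
  let wrapped : List Char := List.replicate (pw.toList.length - head.length) 'a'   -- 'a' * (len(pw)-len(head))
  if head.isEmpty then String.ofList wrapped
  else
    let c : Char := PySem.List.pyGetD head (-1) 'a'          -- c = head[-1]; head ≠ [] so in range
    let bump : Int := if c ∈ ['h', 'n', 'k'] then 2 else 1   -- 2 if c in ('h','n','k') else 1
    -- head[:-1] + chr(ord(c) + bump) + wrapped
    String.ofList (PySem.List.slice head none (some (-1)) ++ [Char.ofNat (c.toNat + bump.toNat)] ++ wrapped)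

-- ===== PRECONDITION & SPEC =====
-- On passwords whose last non-'z' character is a backquote (below 'a', outside the password alphabet)
-- and is not the first character, A's suffix recount accidentally treats backquote+1 as a z-style wrap
-- and keeps carrying leftwards, while B stops the carry after bumping the backquote; stopping the carry
-- at a non-'z' character is the intended rule.
-- true iff the string's last non-'z' character exists, is '`', and is not its first character
def pwTailBq : List Char → Bool
  | [] => false
  | c :: r => if c = 'z' then pwTailBq r else c == '`' && !r.isEmpty

def D_password_increment (pw : String) : Prop := pwTailBq pw.toList.reverse = true
instance (pw : String) : Decidable (D_password_increment pw) := by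
  unfold D_password_increment; infer_instance

def Spec_password_increment (pw : String) (out : String) : Prop :=
  ¬ D_password_increment pw → out = password_increment_alt pw
instance (pw : String) (out : String) : Decidable (Spec_password_increment pw out) := by
  unfold Spec_password_increment; infer_instance

def pvDiffWitness_password_increment : String := "b`"
def pvDiffWitnessOut_password_increment : String × String := ("ca", "ba")

-- ===== CLAIM (what is proved, stated in full; the proofs are below) =====
def Claim_unchanged_password_increment : Prop :=
  ∀ (pw : String), Dom_password_increment pw → Spec_password_increment pw (password_increment pw)
def Claim_changed_password_increment : Prop :=
  Dom_password_increment (pvDiffWitness_password_increment) ∧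
  D_password_increment (pvDiffWitness_password_increment) ∧
  password_increment (pvDiffWitness_password_increment) = pvDiffWitnessOut_password_increment.1 ∧
  password_increment_alt (pvDiffWitness_password_increment) = pvDiffWitnessOut_password_increment.2 ∧
  pvDiffWitnessOut_password_increment.1 ≠ pvDiffWitnessOut_password_increment.2
def Claim_exact_password_increment : Prop :=
  ∀ (pw : String), Dom_password_increment pw → D_password_increment pw →
    password_increment pw ≠ password_increment_alt pw

-- ===== LEMMAS AND PROOFS =====

-- shared vocabulary for the proofs: the one-character bump, and the two carry recursions.
def pwBumpC (c : Char) : Char :=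
  Char.ofNat (c.toNat + (if c = 'h' ∨ c = 'n' ∨ c = 'k' then 2 else 1))

-- what A's loop body writes when the all-'a' suffix check fires at the char c
def pwNew (c : Char) : Char := if c = 'z' then 'a' else pwBumpC c

-- B's carry (over the reversed password): wraps exactly on 'z'
def pwCarry1 : List Char → List Char
  | [] => []
  | c :: r => if c = 'z' then 'a' :: pwCarry1 r else pwBumpC c :: r

-- A's carry (over the reversed password): also wraps on '`' (since '`'+1 = 'a')
def pwCarry2 : List Char → List Char
  | [] => []
  | c :: r => if c = 'z' ∨ c = '`' then 'a' :: pwCarry2 r else pwBumpC c :: r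

theorem pwStepA_hit (u : List Char) (d : Char) (j : ℕ) :
    pwStepA (u ++ d :: List.replicate (j + 1) 'a') ((j : Int) + 1)
      = u ++ pwNew d :: List.replicate (j + 1) 'a' := by
  have hs : u ++ d :: List.replicate (j + 1) 'a'
      = (u ++ [d]) ++ List.replicate (j + 1) 'a' := by simp
  have hlen : (u ++ d :: List.replicate (j + 1) 'a').length = u.length + (j + 2) := by
    simp
  have hneg : -((j : Int) + 1) = -(((j + 1 : ℕ)) : Int) := by push_cast; ring
  have hslice : PySem.List.slice (u ++ d :: List.replicate (j + 1) 'a')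
      (some (-((j : Int) + 1))) none = List.replicate (j + 1) 'a' := by
    rw [hneg, PySem.List.slice_from_neg_natCast _ _ (by omega), hlen, hs]
    rw [show u.length + (j + 2) - (j + 1) = (u ++ [d]).length by simp; omega, List.drop_left]
  have hget : ∀ i : Int, i = -((j : Int) + 2) →
      PySem.List.pyGetD (u ++ d :: List.replicate (j + 1) 'a') i 'a' = d := by
    intro i hi
    rw [hi, show -((j : Int) + 2) = -(((j + 2 : ℕ)) : Int) by push_cast; ring,
      PySem.List.pyGetD_neg_natCast _ _ _ (by omega) (by rw [hlen]; omega)]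
    rw [List.getElem_append_right (by omega) (h₂ := by rw [hlen]; omega)]
    simp [hlen]
  unfold pwStepA
  rw [hslice, if_pos (by rw [PySem.List.count_eq, List.count_replicate_self]; push_cast; ring),
    hget _ (by ring), hget _ (by ring)]
  rw [PySem.List.len_eq, hlen]
  rw [show ((u.length + (j + 2) : ℕ) : Int) - ((j : Int) + 1) - 1 = ((u.length : ℕ) : Int) by
        push_cast; ring,
      show ((u.length + (j + 2) : ℕ) : Int) - ((j : Int) + 1) = ((u.length + 1 : ℕ) : Int) by
        push_cast; ring]
  rw [PySem.List.slice_to_natCast, PySem.List.slice_from_natCast]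
  rw [show List.take u.length (u ++ d :: List.replicate (j + 1) 'a') = u from List.take_left]
  rw [hs, show u.length + 1 = (u ++ [d]).length by simp, List.drop_left]
  by_cases hz : d = 'z'
  · subst hz; simp [pwNew]
  · simp [pwNew, pwBumpC, hz, apply_ite Int.toNat]

theorem pwStepA_miss (u v : List Char) (d : Char) (i : Int) (hd : d ≠ 'a')
    (hi : (v.length : Int) < i) : pwStepA (u ++ d :: v) i = u ++ d :: v := by
  have hipos : 0 < i := by omega
  have hik : i = (i.toNat : Int) := by omega
  have hslice : PySem.List.slice (u ++ d :: v) (some (-i)) none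
      = List.drop ((u ++ d :: v).length - i.toNat) (u ++ d :: v) := by
    rw [hik, PySem.List.slice_from_neg_natCast _ _ (by omega)]
    simp only [Int.toNat_natCast]
  have hmem : d ∈ List.drop ((u ++ d :: v).length - i.toNat) (u ++ d :: v) := by
    rw [List.drop_append_of_le_length (by simp; omega)]
    simp
  unfold pwStepA
  rw [hslice, if_neg]
  intro hc
  rw [PySem.List.count_eq] at hc
  have hle : List.count 'a' (List.drop ((u ++ d :: v).length - i.toNat) (u ++ d :: v))
      ≤ (List.drop ((u ++ d :: v).length - i.toNat) (u ++ d :: v)).length :=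
    List.count_le_length
  have hlenL : (List.drop ((u ++ d :: v).length - i.toNat) (u ++ d :: v)).length ≤ i.toNat := by
    rw [List.length_drop]; omega
  have hcnt : List.count 'a' (List.drop ((u ++ d :: v).length - i.toNat) (u ++ d :: v))
      = (List.drop ((u ++ d :: v).length - i.toNat) (u ++ d :: v)).length := by omega
  have := List.count_eq_length.mp hcnt d hmem
  exact hd this.symm

theorem foldl_fixed {f : List Char → Int → List Char} (L : List Int) (s : List Char)
    (h : ∀ i ∈ L, f s i = s) : L.foldl f s = s := by
  induction L with
  | nil => rfl
  | cons a L ih =>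
    simp only [List.foldl_cons, h a (by simp)]
    exact ih (fun i hi => h i (by simp [hi]))

theorem char_toNat_inj {c d : Char} (h : c.toNat = d.toNat) : c = d := by
  apply Char.ext
  unfold Char.toNat at h
  exact UInt32.toNat_inj.mp h

theorem char_toNat_ofNat {n : ℕ} (h : n ≤ 128) : (Char.ofNat n).toNat = n := by
  rw [Char.toNat_ofNat, if_pos]; exact Or.inl (by omega)

theorem pwBumpC_ne_a {c : Char} (hc : c.toNat ≤ 126) (hz : ¬(c = 'z' ∨ c = '`')) :
    pwBumpC c ≠ 'a' := by
  intro hEq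
  unfold pwBumpC at hEq
  by_cases hk : c = 'h' ∨ c = 'n' ∨ c = 'k'
  · rcases hk with h | h | h <;> subst h <;> revert hEq <;> decide
  · rw [if_neg hk] at hEq
    have := congrArg Char.toNat hEq
    rw [char_toNat_ofNat (by omega)] at this
    have h96 : c.toNat = 96 := by simpa using this
    exact hz (Or.inr (char_toNat_inj h96))

theorem pwFoldA (r : List Char) : ∀ (j : ℕ), (∀ c ∈ r, c.toNat ≤ 126) →
    (PySem.List.pyRange ((j : Int) + 1) ((j : Int) + 1 + r.length)).foldl pwStepA
        (r.reverse ++ List.replicate (j + 1) 'a')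
      = (pwCarry2 r).reverse ++ List.replicate (j + 1) 'a' := by
  induction r with
  | nil =>
    intro j _
    rw [PySem.List.pyRange_one_eq_nil (by simp)]
    rfl
  | cons c r ih =>
    intro j hv
    rw [PySem.List.pyRange_one_cons (by push_cast [List.length_cons]; omega)]
    simp only [List.foldl_cons]
    rw [show (c :: r).reverse ++ List.replicate (j + 1) 'a'
          = r.reverse ++ c :: List.replicate (j + 1) 'a' by simp,
        pwStepA_hit]
    by_cases hw : c = 'z' ∨ c = '`'
    · have hnew : pwNew c = 'a' := by rcases hw with h | h <;> subst h <;> decide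
      rw [hnew,
        show r.reverse ++ 'a' :: List.replicate (j + 1) 'a'
            = r.reverse ++ List.replicate (j + 1 + 1) 'a' by simp [List.replicate_succ],
        show (j : Int) + 1 + 1 = ((j + 1 : ℕ) : Int) + 1 by push_cast; ring,
        show (j : Int) + 1 + ((c :: r).length : Int) = ((j + 1 : ℕ) : Int) + 1 + (r.length : Int) by
          push_cast [List.length_cons]; ring]
      rw [ih (j + 1) (fun x hx => hv x (by simp [hx]))]
      rw [show pwCarry2 (c :: r) = 'a' :: pwCarry2 r by rw [pwCarry2, if_pos hw]]
      simp [List.replicate_succ]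
    · have hnew : pwNew c = pwBumpC c := by rw [pwNew, if_neg (by tauto)]
      have hne : pwBumpC c ≠ 'a' := pwBumpC_ne_a (hv c (by simp)) hw
      rw [hnew, foldl_fixed]
      · rw [show pwCarry2 (c :: r) = pwBumpC c :: r by rw [pwCarry2, if_neg hw]]
        simp
      · intro i hi
        have hmem := (PySem.List.mem_pyRange_one).mp hi
        exact pwStepA_miss _ _ _ _ hne (by simp only [List.length_replicate]; omega)

theorem dom_toNat_le (pw : String) (h : Dom_password_increment pw) :
    ∀ c ∈ pw.toList, c.toNat ≤ 126 := by
  intro c hc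
  have := (List.all_eq_true.mp h) c hc
  simp only [pvDomChar, Bool.or_eq_true, Bool.and_eq_true, decide_eq_true_eq,
    Nat.beq_eq_true_eq] at this
  omega

theorem password_increment_eq (pw : String) (hDom : ∀ c ∈ pw.toList, c.toNat ≤ 126) :
    password_increment pw = String.ofList ((pwCarry2 pw.toList.reverse).reverse) := by
  simp only [password_increment]
  have hfold := pwFoldA pw.toList.reverse 0 (fun c hc => hDom c (by simpa using hc))
  norm_num at hfold
  have hlen1 : PySem.List.len (pw.toList ++ ['a']) = 1 + (pw.length : Int) := by
    rw [PySem.List.len_eq]; push_cast [List.length_append, String.length_toList]; exact add_comm _ _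
  rw [hlen1, hfold]
  have h2 : PySem.List.len ((pwCarry2 pw.toList.reverse).reverse ++ ['a']) - 1
      = (((pwCarry2 pw.toList.reverse).reverse.length : ℕ) : Int) := by
    rw [PySem.List.len_eq]; simp
  rw [h2, PySem.List.slice_to_natCast, List.take_left]

theorem carry1_replicate_z (t : ℕ) (x : List Char) :
    pwCarry1 (List.replicate t 'z' ++ x) = List.replicate t 'a' ++ pwCarry1 x := by
  induction t with
  | zero => simp
  | succ t ih => simp [List.replicate_succ, pwCarry1, ih]

theorem password_increment_alt_eq (pw : String) :
    password_increment_alt pw = String.ofList ((pwCarry1 pw.toList.reverse).reverse) := by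
  simp only [password_increment_alt]
  have htw : pw.toList.reverse.takeWhile (· == 'z')
      = List.replicate ((pw.toList.reverse.takeWhile (· == 'z')).length) 'z' :=
    List.eq_replicate_of_mem (fun x hx => by simpa using List.mem_takeWhile_imp hx)
  have hsplit : List.replicate ((pw.toList.reverse.takeWhile (· == 'z')).length) 'z'
      ++ pw.toList.reverse.dropWhile (· == 'z') = pw.toList.reverse := by
    rw [← htw]; exact List.takeWhile_append_dropWhile
  have hlenr : pw.toList.length = pw.toList.reverse.length := by simp
  cases hrest : pw.toList.reverse.dropWhile (· == 'z') with
  | nil =>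
    rw [hrest] at hsplit
    have hT : (pw.toList.reverse.takeWhile (· == 'z')).length = pw.toList.length := by
      have h := congrArg List.length hsplit
      simp only [List.length_append, List.length_replicate, List.length_nil,
        List.length_reverse] at h
      omega
    rw [if_pos (by simp)]
    rw [show pwCarry1 pw.toList.reverse = List.replicate
          ((pw.toList.reverse.takeWhile (· == 'z')).length) 'a' by
        rw [← hsplit]; simpa [pwCarry1] using carry1_replicate_z _ []]
    rw [List.reverse_replicate, hT]
    simp
  | cons c w =>
    have hcz : c ≠ 'z' := by
      have h0 := List.head?_dropWhile_not (· == 'z') pw.toList.reverse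
      rw [hrest] at h0
      simpa using h0
    rw [hrest] at hsplit
    rw [if_neg (by simp)]
    rw [PySem.List.pyGetD_neg_one _ _ (List.reverse_ne_nil_iff.mpr (List.cons_ne_nil c w)),
        show ((c :: w).reverse.getLast (List.reverse_ne_nil_iff.mpr (List.cons_ne_nil c w))) = c by
          rw [List.getLast_reverse]; rfl]
    rw [PySem.List.slice_to_neg_one, List.dropLast_reverse]
    have hc1 : pwCarry1 pw.toList.reverse
        = List.replicate ((pw.toList.reverse.takeWhile (· == 'z')).length) 'a'
          ++ (pwBumpC c :: w) := by
      conv_lhs => rw [← hsplit]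
      rw [carry1_replicate_z]
      simp [pwCarry1, hcz]
    rw [hc1]
    have hb : Char.ofNat (c.toNat + (if c ∈ ['h', 'n', 'k'] then (2 : Int) else 1).toNat)
        = pwBumpC c := by
      rw [pwBumpC]
      congr 1
      simp [apply_ite Int.toNat]
    have hT : pw.toList.length - (c :: w).reverse.length
        = (pw.toList.reverse.takeWhile (· == 'z')).length := by
      have h := congrArg List.length hsplit
      simp only [List.length_append, List.length_replicate, List.length_cons,
        List.length_reverse] at h ⊢
      omega
    rw [hb, hT]
    simp [List.reverse_append]

theorem D_iff (pw : String) : D_password_increment pw ↔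
    ((pw.toList.reverse.dropWhile (· == 'z')).head? = some '`' ∧
      pw.toList.reverse.dropWhile (· == 'z') ≠ ['`']) := by
  unfold D_password_increment
  induction pw.toList.reverse with
  | nil => simp [pwTailBq]
  | cons c r ih =>
    by_cases hz : c = 'z'
    · simpa [pwTailBq, hz] using ih
    · simp only [pwTailBq, if_neg hz, List.dropWhile_cons,
        show (c == 'z') = false by simpa using hz, Bool.false_eq_true, if_false,
        List.head?_cons, Option.some.injEq, Bool.and_eq_true, beq_iff_eq,
        Bool.not_eq_eq_eq_not, Bool.not_true, List.isEmpty_eq_false_iff]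
      constructor
      · rintro ⟨h1, h2⟩
        exact ⟨h1, by subst h1; intro he; exact h2 (by simpa using congrArg List.tail he)⟩
      · rintro ⟨h1, h2⟩
        subst h1
        exact ⟨rfl, fun he => h2 (by rw [he])⟩

theorem carry2_eq_carry1 (r : List Char)
    (h : ¬((r.dropWhile (· == 'z')).head? = some '`' ∧ r.dropWhile (· == 'z') ≠ ['`'])) :
    pwCarry2 r = pwCarry1 r := by
  induction r with
  | nil => rfl
  | cons c r ih =>
    by_cases hz : c = 'z'
    · have hdw : (c :: r).dropWhile (· == 'z') = r.dropWhile (· == 'z') := by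
        simp [hz]
      rw [hdw] at h
      simp [pwCarry2, pwCarry1, hz, ih h]
    · have hdw : (c :: r).dropWhile (· == 'z') = c :: r := by
        simp [hz]
      rw [hdw] at h
      by_cases hb : c = '`'
      · have hr : r = [] := by
          by_contra hr
          exact h ⟨by simp [hb], fun he => hr (by simpa using congrArg List.tail he)⟩
        subst hb; subst hr
        decide
      · simp [pwCarry2, pwCarry1, hz, hb]

theorem carry2_ne_carry1 (r : List Char) (hv : ∀ c ∈ r, c.toNat ≤ 126)
    (h1 : (r.dropWhile (· == 'z')).head? = some '`') (h2 : r.dropWhile (· == 'z') ≠ ['`']) :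
    pwCarry2 r ≠ pwCarry1 r := by
  induction r with
  | nil => simp at h1
  | cons c r ih =>
    by_cases hz : c = 'z'
    · have hdw : (c :: r).dropWhile (· == 'z') = r.dropWhile (· == 'z') := by
        simp [hz]
      rw [hdw] at h1 h2
      have := ih (fun x hx => hv x (by simp [hx])) h1 h2
      simpa [pwCarry2, pwCarry1, hz] using this
    · have hdw : (c :: r).dropWhile (· == 'z') = c :: r := by
        simp [hz]
      rw [hdw] at h1 h2
      have hb : c = '`' := by simpa using h1
      subst hb
      have hr : r ≠ [] := by intro h; exact h2 (by simp [h])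
      -- both sides start with 'a'; they differ in the tail: pwCarry2 r ≠ r
      simp only [pwCarry2, pwCarry1, if_neg (by decide : ¬('`' : Char) = 'z')]
      have hba : pwBumpC '`' = 'a' := by decide
      rw [hba]
      intro hEq
      have htl : pwCarry2 r = r := by simpa using hEq
      -- but pwCarry2 changes the head of a nonempty valid list
      cases r with
      | nil => exact hr rfl
      | cons d v =>
        have hd : d.toNat ≤ 126 := hv d (by simp)
        by_cases hw : d = 'z' ∨ d = '`'
        · rw [pwCarry2, if_pos hw] at htl
          have hhead : 'a' = d := by
            have := congrArg List.head? htl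
            simpa using this
          rcases hw with h | h <;> subst h <;> exact absurd hhead (by decide)
        · rw [pwCarry2, if_neg hw] at htl
          have hhd : pwBumpC d = d := by
            have := congrArg List.head? htl
            simpa using this
          have := congrArg Char.toNat hhd
          unfold pwBumpC at this
          by_cases hk : d = 'h' ∨ d = 'n' ∨ d = 'k'
          · rcases hk with h | h | h <;> subst h <;> exact absurd hhd (by decide)
          · rw [if_neg hk, char_toNat_ofNat (by omega)] at this
            omega

-- ===== VERDICT (by name: the statement is the Claim_ definition above) =====
theorem password_increment_spec : Claim_unchanged_password_increment := by
  intro pw hDom hND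
  rw [password_increment_eq pw (dom_toNat_le pw hDom), password_increment_alt_eq pw]
  rw [carry2_eq_carry1 _ ((not_congr (D_iff pw)).mp hND)]

theorem password_increment_changed : Claim_changed_password_increment := by
  unfold Claim_changed_password_increment; decide

theorem password_increment_tight : Claim_exact_password_increment := by
  intro pw hDom hD hEq
  rw [password_increment_eq pw (dom_toNat_le pw hDom), password_increment_alt_eq pw] at hEq
  have := congrArg String.toList hEq
  simp only [String.toList_ofList] at this
  have hD' := (D_iff pw).mp hD
  exact carry2_ne_carry1 pw.toList.reverse
    (fun c hc => dom_toNat_le pw hDom c (by simpa using hc)) hD'.1 hD'.2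
    (List.reverse_injective this)
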